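-- pv_equiv track=rewrite | github.com/pypi-data/pypi-mirror-398 | packages/numthy/numthy-0.0.0.tar.gz/numthy-0.0.0/numthy.py | cubes
-- ===== SOURCE A (Python) =====
-- from math import factorial, gcd, inf, isqrt, lcm, log, prod, sqrt
-- from typing import Any, Callable, Hashable, Iterable, Iterator
--
-- def iroot(x: int, n: int = 2) -> int:
--     """
--     Find the integer n-th root of x.
--     Returns the largest integer a such that a^n <= x.
--     Uses Newton's method.
--     """
--     # Handle special cases
--     if x < 0:
--         if n % 2 == 0:
--             raise ValueError("Cannot compute even root of negative number")
--         return -iroot(-x - 1, n) - 1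
--     if x == 0:
--         return 0
--     if n <= 0:
--         raise ValueError("n must be a positive integer")
--     if n == 1:
--         return x
--     if n == 2:
--         return isqrt(x)
--
--     # Set initial guess to 2^ceil(log2(x)/n)
--     a = 1 << ((x.bit_length() + n - 1) // n)
--
--     # Run Newton's method on f(a) = a^n - x = 0
--     a, b = a, a + 1
--     while a < b:
--         b = a
--         a = ((n - 1) * a + x // pow(a, n - 1)) // n
--
--     return b
--
-- def cubes(low: int = 0, high: int | None = None) -> Iterator[int]:
--     """
--     Generate cube numbers in the range [low, high].
--     """
--     high = inf if high is None else high
--     i = iroot(low, 3)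
--     while (n := i*i*i) < low:
--         i += 1
--     while n <= high:
--         yield n
--         n += 3*i*i + 3*i + 1
--         i += 1
-- ===== SOURCE B (Python) =====
-- def _icbrt(x):
--     """Largest a with a**3 <= x, by binary search (exponential bracket + bisection)."""
--     if x < 0:
--         return -_icbrt(-x - 1) - 1
--     hi = 1
--     while hi * hi * hi <= x:
--         hi *= 2
--     lo = 0
--     while hi - lo > 1:
--         mid = (lo + hi) // 2
--         if mid * mid * mid <= x:
--             lo = mid
--         else:
--             hi = mid
--     return lo
--
--
-- def cubes(low=0, high=None):
--     """Generate cube numbers in the range [low, high]."""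
--     start = _icbrt(low - 1) + 1  # smallest i with i**3 >= low
--     if high is None:
--         i = start
--         while True:
--             yield i * i * i
--             i += 1
--     else:
--         for i in range(start, _icbrt(high) + 1):
--             yield i * i * i
-- ===== Notes on version B (the rewrite author's own statement) =====
-- stated objective: simpler
-- what changed: B drops A's Newton-iteration n-th root and the incremental finite-difference accumulator (n += 3*i*i + 3*i + 1): it finds the floor cube root by exponential-bracket binary search and yields each cube directly as i*i*i over a plain range from the least index with i**3 >= low to the floor cube root of high.
import Mathlib
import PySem

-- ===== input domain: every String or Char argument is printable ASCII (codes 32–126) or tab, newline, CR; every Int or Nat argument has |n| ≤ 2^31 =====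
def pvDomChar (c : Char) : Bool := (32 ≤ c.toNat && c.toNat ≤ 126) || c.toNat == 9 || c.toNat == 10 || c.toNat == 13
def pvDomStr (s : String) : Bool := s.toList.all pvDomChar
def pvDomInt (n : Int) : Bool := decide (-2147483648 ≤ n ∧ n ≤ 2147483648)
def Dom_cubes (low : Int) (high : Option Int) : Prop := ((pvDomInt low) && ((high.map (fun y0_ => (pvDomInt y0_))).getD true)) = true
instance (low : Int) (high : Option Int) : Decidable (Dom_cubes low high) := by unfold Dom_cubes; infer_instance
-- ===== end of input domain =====

-- B replaces A's Newton-iteration root plus incremental finite-difference accumulator loop by a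
-- binary-search cube root and a direct range of cubes (simpler decomposition; the equivalence is
-- about the materialised return value — both Pythons are generators).

-- ===== PORT A =====
-- a = ((n - 1) * a + x // pow(a, n - 1)) // n
def newtonStep (x n a : Int) : Int :=
  PySem.Int.floordiv ((n - 1) * a + PySem.Int.floordiv x (a ^ (n - 1).toNat)) n

-- 'while a < b: b = a; a = newtonStep …'; the fuel argument is a pure totality guard:
-- it starts at b's value and b strictly decreases by ≥ 1 per pass, so it never runs out.
def newtonLoop (x n : Int) : Nat → Int → Int → Int
  | 0, _, b => b
  | fuel + 1, a, b => if a < b then newtonLoop x n fuel (newtonStep x n a) a else b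

def iroot (x : Int) (n : Int) : Int :=
  if _h : x < 0 then
    if PySem.Int.mod n 2 = 0 then 0  -- Python raises ValueError here; unreachable from cubes (n = 3)
    else -iroot (-x - 1) n - 1
  else if x = 0 then 0
  else if n ≤ 0 then 0  -- Python raises ValueError here; unreachable from cubes (n = 3)
  else if n = 1 then x
  else if n = 2 then Int.sqrt x  -- isqrt(x), x ≥ 0 here; unreachable from cubes (n = 3)
  else
    let a : Int := 1 <<< (PySem.Int.floordiv ((PySem.Int.bitLength x : Int) + n - 1) n).toNat
    newtonLoop x n (a + 1).toNat a (a + 1)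
termination_by x.natAbs
decreasing_by omega

-- 'while (n := i*i*i) < low: i += 1' — returns the final i (n is then i*i*i)
def cubesAdvance (low i : Int) : Int :=
  if _h : i * i * i < low then cubesAdvance low (i + 1) else i
termination_by (max low 1 - i).toNat
decreasing_by
  have hi : i < max low 1 := by
    by_contra hle
    rw [not_lt] at hle
    have h1 : (1:Int) ≤ i := le_trans (le_max_right low 1) hle
    have h2 : low ≤ i := le_trans (le_max_left low 1) hle
    nlinarith
  omega

-- 'while n <= high: yield n; n += 3*i*i + 3*i + 1; i += 1'
def cubesLoop (high n i : Int) : List Int :=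
  if _h : n ≤ high then n :: cubesLoop high (n + 3 * i * i + 3 * i + 1) (i + 1) else []
termination_by (high + 1 - n).toNat
decreasing_by
  have hstep : 0 ≤ 3 * i * i + 3 * i := by nlinarith [sq_nonneg (2 * i + 1)]
  omega

def cubes (low : Int) (high : Option Int) : List Int :=
  match high with
  | none => []  -- high = None: the Python generator is infinite; excluded by Pre_cubes
  | some h =>
      let i0 := iroot low 3
      let i1 := cubesAdvance low i0
      cubesLoop h (i1 * i1 * i1) i1

-- ===== PORT B =====
-- 'while hi*hi*hi <= x: hi *= 2'; fuel is a pure totality guard (hi doubles from 1,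
-- so x.toNat + 1 passes always suffice).
def icbrtDouble (x : Int) : Nat → Int → Int
  | 0, hi => hi
  | fuel + 1, hi => if hi * hi * hi ≤ x then icbrtDouble x fuel (2 * hi) else hi

-- 'while hi - lo > 1: mid = (lo + hi) // 2; …'
def icbrtBisect (x lo hi : Int) : Int :=
  if _h : 1 < hi - lo then
    let mid := PySem.Int.floordiv (lo + hi) 2
    if mid * mid * mid ≤ x then icbrtBisect x mid hi else icbrtBisect x lo mid
  else lo
termination_by (hi - lo).toNat
decreasing_by
  all_goals
    have hb := PySem.Int.floordiv_two_mid_bounds (lo := lo) (hi := hi) (by omega)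
    have he : PySem.Int.floordiv (lo + hi) 2 = (lo + hi) / 2 :=
      PySem.Int.floordiv_eq_ediv_of_pos (by norm_num)
    rw [he] at hb ⊢
    omega

def icbrt (x : Int) : Int :=
  if _h : x < 0 then -icbrt (-x - 1) - 1
  else icbrtBisect x 0 (icbrtDouble x (x.toNat + 1) 1)
termination_by x.natAbs
decreasing_by omega

def cubes_alt (low : Int) (high : Option Int) : List Int :=
  let start := icbrt (low - 1) + 1  -- smallest i with i*i*i >= low
  match high with
  | none => []  -- high = None: the Python generator is infinite; excluded by Pre_cubes
  | some h => (PySem.List.pyRange start (icbrt h + 1) 1).map (fun i => i * i * i)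

-- ===== PRECONDITION & SPEC =====
-- Pre_ excludes high = None, where the Python generator is infinite (materialising it diverges).
def Pre_cubes (low : Int) (high : Option Int) : Prop := high ≠ none
instance (low : Int) (high : Option Int) : Decidable (Pre_cubes low high) := by unfold Pre_cubes; infer_instance

def pvWitness_cubes : Int × Option Int := (-30, some 30)

def Spec_cubes (low : Int) (high : Option Int) (out : List Int) : Prop := out = cubes_alt low high
instance (low : Int) (high : Option Int) (out : List Int) : Decidable (Spec_cubes low high out) := by unfold Spec_cubes; infer_instance

-- ===== CLAIM (what is proved, stated in full; the proofs are below) =====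
def Claim_equal_cubes : Prop := ∀ (low : Int) (high : Option Int), Dom_cubes low high → Pre_cubes low high → Spec_cubes low high (cubes low high)

-- ===== LEMMAS AND PROOFS =====

lemma cube_le_cube {a b : Int} (h : a ≤ b) : a * a * a ≤ b * b * b := by
  nlinarith [sq_nonneg (a + b), sq_nonneg a, sq_nonneg b, sq_nonneg (a - b)]

lemma lt_of_cube_lt {a b : Int} (h : a * a * a < b * b * b) : a < b := by
  by_contra hle
  exact absurd h (not_lt.mpr (cube_le_cube (by omega)))

lemma cube_lt_cube {a b : Int} (h : a < b) : a * a * a < b * b * b := by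
  have h2 := cube_le_cube (show a ≤ b - 1 by omega)
  nlinarith [sq_nonneg (2 * b - 1)]

-- m ≤ newtonStep x 3 a for every candidate cube root m (the integer AM–GM step bound)
lemma newtonStep_ge (x a m : Int) (ha : 1 ≤ a) (hm : 0 ≤ m) (hmx : m * m * m ≤ x) :
    m ≤ newtonStep x 3 a := by
  unfold newtonStep
  have ha2 : (0:Int) < a ^ ((3:Int) - 1).toNat := by positivity
  rw [PySem.Int.le_floordiv_iff_mul_le (by norm_num)]
  have hq : 3 * m - 2 * a ≤ PySem.Int.floordiv x (a ^ ((3:Int) - 1).toNat) := by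
    rw [PySem.Int.le_floordiv_iff_mul_le ha2]
    have h2 : ((3:Int) - 1).toNat = 2 := rfl
    rw [h2]
    nlinarith [mul_nonneg (sq_nonneg (m - a)) (by linarith : (0:Int) ≤ m + 2 * a)]
  linarith

-- on loop exit (newtonStep a ≥ a) the current value is a genuine lower root bound
lemma newtonStep_exit (x a : Int) (ha : 1 ≤ a) (h : a ≤ newtonStep x 3 a) :
    a * a * a ≤ x := by
  unfold newtonStep at h
  have ha2 : (0:Int) < a ^ ((3:Int) - 1).toNat := by positivity
  rw [PySem.Int.le_floordiv_iff_mul_le (by norm_num)] at h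
  have hq : a ≤ PySem.Int.floordiv x (a ^ ((3:Int) - 1).toNat) := by linarith
  rw [PySem.Int.le_floordiv_iff_mul_le ha2] at hq
  have h2 : ((3:Int) - 1).toNat = 2 := rfl
  rw [h2] at hq
  nlinarith

lemma newtonLoop_spec (x : Int) (hx : 1 ≤ x) :
    ∀ (fuel : Nat) (a b : Int), 1 ≤ a → a < b → b.toNat ≤ fuel →
      (∀ m : Int, 0 ≤ m → m * m * m ≤ x → m ≤ a) →
      (newtonLoop x 3 fuel a b) * (newtonLoop x 3 fuel a b) * (newtonLoop x 3 fuel a b) ≤ x ∧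
      (∀ m : Int, 0 ≤ m → m * m * m ≤ x → m ≤ newtonLoop x 3 fuel a b) := by
  intro fuel
  induction fuel with
  | zero => intro a b ha hab hfb _; omega
  | succ fuel ih =>
      intro a b ha hab hfb hinv
      simp only [newtonLoop, if_pos hab]
      by_cases hs : newtonStep x 3 a < a
      · exact ih (newtonStep x 3 a) a (newtonStep_ge x a 1 ha (by norm_num) (by linarith)) hs
          (by omega) (fun m hm hmx => newtonStep_ge x a m ha hm hmx)
      · have hconst : newtonLoop x 3 fuel (newtonStep x 3 a) a = a := by
          cases fuel <;> simp [newtonLoop, hs]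
        rw [hconst]
        exact ⟨newtonStep_exit x a ha (by omega), hinv⟩

lemma iroot3_nonneg (x : Int) (hx : 0 ≤ x) :
    (iroot x 3) * (iroot x 3) * (iroot x 3) ≤ x ∧
    x < (iroot x 3 + 1) * (iroot x 3 + 1) * (iroot x 3 + 1) := by
  by_cases hx0 : x = 0
  · subst hx0; rw [iroot]; norm_num
  · have hx1 : 1 ≤ x := by omega
    have hne : ¬ x < 0 := by omega
    rw [iroot]
    simp only [dif_neg hne, if_neg hx0, if_neg (show ¬(3:Int) ≤ 0 by norm_num),
      if_neg (show (3:Int) ≠ 1 by norm_num), if_neg (show (3:Int) ≠ 2 by norm_num)]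
    set k : Nat := (PySem.Int.floordiv ((PySem.Int.bitLength x : Int) + 3 - 1) 3).toNat with hkdef
    set a : Int := ((1 <<< k : Nat) : Int) with hadef
    have ha : a = 2 ^ k := by rw [hadef, Nat.one_shiftLeft]; push_cast; ring
    have hk3 : PySem.Int.bitLength x ≤ 3 * k := by
      rw [hkdef, PySem.Int.floordiv_eq_ediv_of_pos (by norm_num)]
      omega
    have hxa : x < a * a * a := by
      have h1 : (x.natAbs : Int) < (2:Int) ^ PySem.Int.bitLength x := by
        exact_mod_cast PySem.Int.lt_two_pow_bitLength x
      have h2 : ((2:Int)) ^ PySem.Int.bitLength x ≤ 2 ^ (3 * k) := by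
        exact pow_le_pow_right₀ (by norm_num) hk3
      have h3 : a * a * a = 2 ^ (3 * k) := by rw [ha]; ring
      rw [h3]
      calc x = (x.natAbs : Int) := by omega
        _ < (2:Int) ^ PySem.Int.bitLength x := h1
        _ ≤ 2 ^ (3 * k) := h2
    have ha1 : (1:Int) ≤ a := by rw [ha]; exact one_le_pow₀ (by norm_num)
    have hinv : ∀ m : Int, 0 ≤ m → m * m * m ≤ x → m ≤ a := by
      intro m _ hmx
      exact le_of_lt (lt_of_cube_lt (by omega))
    obtain ⟨hlo, hall⟩ := newtonLoop_spec x hx1 (a + 1).toNat a (a + 1) ha1 (by omega) le_rfl hinv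
    refine ⟨hlo, ?_⟩
    by_contra hub
    rw [not_lt] at hub
    have hr0 : 0 ≤ newtonLoop x 3 (a + 1).toNat a (a + 1) :=
      hall 0 le_rfl (by simpa using hx)
    have := hall _ (by omega) hub
    omega

-- iroot x 3 is the floor cube root, for every x
lemma iroot3_spec (x : Int) :
    (iroot x 3) * (iroot x 3) * (iroot x 3) ≤ x ∧
    x < (iroot x 3 + 1) * (iroot x 3 + 1) * (iroot x 3 + 1) := by
  by_cases hx : 0 ≤ x
  · exact iroot3_nonneg x hx
  · have hxn : x < 0 := by omega
    rw [iroot]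
    simp only [dif_pos hxn, if_neg (show ¬ PySem.Int.mod 3 2 = 0 by decide)]
    obtain ⟨hs1, hs2⟩ := iroot3_nonneg (-x - 1) (by omega)
    constructor <;> nlinarith

lemma icbrtDouble_spec (x : Int) :
    ∀ (fuel : Nat) (hi : Int), 1 ≤ hi → x < hi + fuel →
      1 ≤ icbrtDouble x fuel hi ∧
      x < (icbrtDouble x fuel hi) * (icbrtDouble x fuel hi) * (icbrtDouble x fuel hi) := by
  intro fuel
  induction fuel with
  | zero =>
      intro hi h1 hx
      simp only [icbrtDouble]
      have hsq : 1 * 1 ≤ hi * hi := mul_le_mul h1 h1 (by norm_num) (by omega)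
      have hcube : hi * 1 ≤ hi * (hi * hi) := by nlinarith
      push_cast at hx
      exact ⟨h1, by nlinarith⟩
  | succ fuel ih =>
      intro hi h1 hx
      simp only [icbrtDouble]
      by_cases hc : hi * hi * hi ≤ x
      · rw [if_pos hc]
        exact ih (2 * hi) (by omega) (by push_cast at hx ⊢; omega)
      · rw [if_neg hc]
        exact ⟨h1, by omega⟩

lemma icbrtBisect_spec (x : Int) :
    ∀ (n : Nat) (lo hi : Int), (hi - lo).toNat ≤ n → lo < hi →
      lo * lo * lo ≤ x → x < hi * hi * hi →
      (icbrtBisect x lo hi) * (icbrtBisect x lo hi) * (icbrtBisect x lo hi) ≤ x ∧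
      x < (icbrtBisect x lo hi + 1) * (icbrtBisect x lo hi + 1) * (icbrtBisect x lo hi + 1) := by
  intro n
  induction n with
  | zero => intro lo hi hn hlt _ _; omega
  | succ n ih =>
      intro lo hi hn hlt hlo hhi
      rw [icbrtBisect]
      by_cases hgap : 1 < hi - lo
      · rw [dif_pos hgap]
        have hb := PySem.Int.floordiv_two_mid_bounds (lo := lo) (hi := hi) (by omega)
        have he : PySem.Int.floordiv (lo + hi) 2 = (lo + hi) / 2 :=
          PySem.Int.floordiv_eq_ediv_of_pos (by norm_num)
        rw [he] at hb
        simp only [he]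
        have hmid1 : lo < (lo + hi) / 2 := by omega
        have hmid2 : (lo + hi) / 2 < hi := by omega
        by_cases hc : ((lo + hi) / 2) * ((lo + hi) / 2) * ((lo + hi) / 2) ≤ x
        · rw [if_pos hc]
          exact ih ((lo + hi) / 2) hi (by omega) hmid2 hc hhi
        · rw [if_neg hc]
          exact ih lo ((lo + hi) / 2) (by omega) hmid1 hlo (by omega)
      · rw [dif_neg hgap]
        have : hi = lo + 1 := by omega
        subst this
        exact ⟨hlo, hhi⟩

-- icbrt x is the floor cube root, for every x
lemma icbrt_spec (x : Int) :
    (icbrt x) * (icbrt x) * (icbrt x) ≤ x ∧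
    x < (icbrt x + 1) * (icbrt x + 1) * (icbrt x + 1) := by
  by_cases hx : x < 0
  · rw [icbrt, dif_pos hx]
    obtain ⟨h1, h2⟩ := icbrt_spec (-x - 1)
    constructor <;> nlinarith
  · rw [icbrt, dif_neg hx]
    obtain ⟨hd1, hd2⟩ := icbrtDouble_spec x (x.toNat + 1) 1 le_rfl (by omega)
    have hhi0 : 0 < icbrtDouble x (x.toNat + 1) 1 := by omega
    exact icbrtBisect_spec x _ 0 _ le_rfl hhi0 (by simpa using not_lt.mp hx) hd2
termination_by x.natAbs
decreasing_by omega

-- the two start indices coincide: A's advance loop lands on the least i with i³ ≥ low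
lemma start_eq (low : Int) : cubesAdvance low (iroot low 3) = icbrt (low - 1) + 1 := by
  obtain ⟨hf1, hf2⟩ := iroot3_spec low
  obtain ⟨hg1, hg2⟩ := icbrt_spec (low - 1)
  set f := iroot low 3 with hfd
  set g := icbrt (low - 1) with hgd
  rw [cubesAdvance]
  by_cases hc : f * f * f < low
  · rw [dif_pos hc, cubesAdvance, dif_neg (show ¬ (f+1)*(f+1)*(f+1) < low by omega)]
    have h1 : f < g + 1 := lt_of_cube_lt (by omega)
    have h2 : g < f + 1 := lt_of_cube_lt (by omega)
    omega
  · rw [dif_neg hc]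
    have h1 : g < f := lt_of_cube_lt (by omega)
    have hcube : (f - 1) * (f - 1) * (f - 1) < f * f * f := cube_lt_cube (by omega)
    have h2 : f - 1 < g + 1 := lt_of_cube_lt (by omega)
    omega

-- A's incremental yield loop is B's range of cubes
lemma cubesLoop_eq (h : Int) :
    ∀ (cnt : Nat) (i : Int), (icbrt h + 1 - i).toNat ≤ cnt →
      cubesLoop h (i * i * i) i =
        (PySem.List.pyRange i (icbrt h + 1) 1).map (fun j => j * j * j) := by
  obtain ⟨hf1, hf2⟩ := icbrt_spec h
  set f := icbrt h with hfd
  intro cnt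
  induction cnt with
  | zero =>
      intro i hn
      have hif : f + 1 ≤ i := by omega
      have hgt : h < i * i * i := by
        have := cube_le_cube hif
        omega
      rw [cubesLoop, dif_neg (by omega), PySem.List.pyRange_one_eq_nil (by omega)]
      simp
  | succ cnt ih =>
      intro i hn
      by_cases hc : i * i * i ≤ h
      · have hile : i < f + 1 := lt_of_cube_lt (by omega)
        rw [cubesLoop, dif_pos hc, PySem.List.pyRange_one_cons hile]
        simp only [List.map_cons]
        congr 1
        have harg : i * i * i + 3 * i * i + 3 * i + 1 = (i + 1) * (i + 1) * (i + 1) := by ring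
        rw [harg]
        exact ih (i + 1) (by omega)
      · have hif : f + 1 ≤ i := by
          by_contra hlt
          exact hc (by
            have := cube_le_cube (show i ≤ f by omega)
            omega)
        rw [cubesLoop, dif_neg hc, PySem.List.pyRange_one_eq_nil (by omega)]
        simp

-- ===== VERDICT (by name: the statement is the Claim_ definition above) =====
theorem cubes_spec : Claim_equal_cubes := by
  intro low high _hdom hpre
  unfold Spec_cubes cubes cubes_alt
  match high with
  | none => exact absurd rfl hpre
  | some h =>
      simp only
      rw [start_eq low]
      exact cubesLoop_eq h _ _ le_rfl
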